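-- pv_equiv track=rewrite | github.com/howtocuddle/ddc-automation | pdf_split_by_pages.py | parse_cuts_spec
-- ===== SOURCE A (Python) =====
-- from typing import List, Tuple
--
-- def parse_cuts_spec(spec: str, total: int) -> List[Tuple[int, int]]:
--     """
--     Parse cut points like "10,20" and produce contiguous segments:
--       1..10, 11..20, 21..total
--     Cut points outside [1, total-1] are ignored.
--     """
--     raw = []
--     for part in (p.strip() for p in spec.split(",") if p.strip()):
--         try:
--             n = int(part)
--             if 1 <= n <= total - 1:
--                 raw.append(n)
--         except ValueError:
--             pass
--     cuts = sorted(set(raw))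
--     if not cuts:
--         # if no valid cuts, the whole doc is one segment
--         return [(1, total)]
--     segments: List[Tuple[int, int]] = []
--     start = 1
--     for c in cuts:
--         segments.append((start, c))
--         start = c + 1
--     if start <= total:
--         segments.append((start, total))
--     return segments
-- ===== SOURCE B (Python) =====
-- def _insort_unique(cuts, n):
--     # keep `cuts` strictly increasing: insert n at its position, skip duplicates
--     for i, c in enumerate(cuts):
--         if n < c:
--             cuts.insert(i, n)
--             return
--         if n == c:
--             return
--     cuts.append(n)
--
--
-- def _segments(start, cuts, total):
--     # structural recursion over the cut list; the tail segment is the base case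
--     if not cuts:
--         return [(start, total)]
--     return [(start, cuts[0])] + _segments(cuts[0] + 1, cuts[1:], total)
--
--
-- def parse_cuts_spec(spec, total):
--     cuts = []  # maintained sorted and duplicate-free online, no set()/sorted()
--     for part in spec.split(","):
--         part = part.strip()
--         if not part:
--             continue
--         try:
--             n = int(part)
--         except ValueError:
--             continue
--         if 1 <= n <= total - 1:
--             _insort_unique(cuts, n)
--     return _segments(1, cuts, total)
-- ===== Notes on version B (the rewrite author's own statement) =====
-- stated objective: alternative
-- what changed: B drops A's staged raw-list + set() + sorted() pipeline and its accumulator loop with a trailing tail-if: it maintains the cut list sorted and duplicate-free online via linear insertion while parsing, and emits segments by structural recursion whose base case is the tail segment (so no empty-cuts branch either).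
import Mathlib
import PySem

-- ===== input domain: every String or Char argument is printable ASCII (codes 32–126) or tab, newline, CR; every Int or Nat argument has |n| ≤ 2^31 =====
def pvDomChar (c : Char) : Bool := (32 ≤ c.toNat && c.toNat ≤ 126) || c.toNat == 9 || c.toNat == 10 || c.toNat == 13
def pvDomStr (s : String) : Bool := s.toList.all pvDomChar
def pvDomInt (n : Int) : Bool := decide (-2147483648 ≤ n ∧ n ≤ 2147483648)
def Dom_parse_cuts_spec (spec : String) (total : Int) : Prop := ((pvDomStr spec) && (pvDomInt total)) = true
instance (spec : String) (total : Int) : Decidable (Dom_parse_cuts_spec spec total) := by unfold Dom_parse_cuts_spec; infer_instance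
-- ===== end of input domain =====

-- B replaces A's raw-list + set() + sorted() staging and its running-start loop with trailing
-- tail-if by an online sorted-unique linear insertion while parsing and a structural recursion
-- emitting the segments (objective: alternative, same cost in practice).
-- spec.split(",") is ported as (split? spec ",").getD []: the separator is the nonempty literal ",",
-- so split? is always some and Python never raises here.

-- ===== PORT A =====
def parse_cuts_spec (spec : String) (total : Int) : List (Int × Int) :=
  let raw : List Int := ((PySem.Str.split? spec ",").getD []).foldl (fun acc p =>
      if PySem.Str.strip p = "" then acc          -- generator filter 'if p.strip()'
      else
        match PySem.Int.ofStr? (PySem.Str.strip p) with   -- try: n = int(part)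
        | some n => if 1 ≤ n ∧ n ≤ total - 1 then acc ++ [n] else acc
        | none => acc                              -- except ValueError: pass
      ) []
  let cuts := PySem.List.sorted (PySem.Set.ofList raw) (fun x => x) false
  if cuts = [] then [(1, total)]
  else
    let st := cuts.foldl (fun (s : List (Int × Int) × Int) c => (s.1 ++ [(s.2, c)], c + 1)) ([], 1)
    if st.2 ≤ total then st.1 ++ [(st.2, total)] else st.1

-- ===== PORT B =====
-- B's _insort_unique: scan for the position of n, insert there, skip if already present
def pcsInsort (cuts : List Int) (n : Int) : List Int :=
  match cuts with
  | [] => [n]                                     -- fell off the loop: cuts.append(n)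
  | c :: rest =>
      if n < c then n :: c :: rest                -- cuts.insert(i, n); return
      else if n = c then c :: rest                -- duplicate: return
      else c :: pcsInsort rest n                  -- keep scanning

-- B's _segments: recursion over the cut list, base case is the tail segment
def pcsSegments (start : Int) (cuts : List Int) (total : Int) : List (Int × Int) :=
  match cuts with
  | [] => [(start, total)]
  | c :: rest => (start, c) :: pcsSegments (c + 1) rest total

def parse_cuts_spec_alt (spec : String) (total : Int) : List (Int × Int) :=
  let cuts : List Int := ((PySem.Str.split? spec ",").getD []).foldl (fun cuts p =>
      let part := PySem.Str.strip p
      if part = "" then cuts                      -- continue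
      else
        match PySem.Int.ofStr? part with
        | none => cuts                            -- except ValueError: continue
        | some n => if 1 ≤ n ∧ n ≤ total - 1 then pcsInsort cuts n else cuts) []
  pcsSegments 1 cuts total

-- ===== PRECONDITION & SPEC =====
def Spec_parse_cuts_spec (spec : String) (total : Int) (out : List (Int × Int)) : Prop := out = parse_cuts_spec_alt spec total
instance (spec : String) (total : Int) (out : List (Int × Int)) : Decidable (Spec_parse_cuts_spec spec total out) := by unfold Spec_parse_cuts_spec; infer_instance

-- ===== CLAIM (what is proved, stated in full; the proofs are below) =====
def Claim_equal_parse_cuts_spec : Prop := ∀ (spec : String) (total : Int), Dom_parse_cuts_spec spec total → Spec_parse_cuts_spec spec total (parse_cuts_spec spec total)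

-- ===== LEMMAS AND PROOFS =====

-- the common accept filter of both programs
def pcsAccept (total : Int) (p : String) : Option Int :=
  if PySem.Str.strip p = "" then none
  else
    match PySem.Int.ofStr? (PySem.Str.strip p) with
    | some n => if 1 ≤ n ∧ n ≤ total - 1 then some n else none
    | none => none

-- A's append loop over the comma parts builds exactly the filterMap of the accept filter.
theorem pcs_raw_eq (total : Int) (l : List String) (acc : List Int) :
    l.foldl (fun acc p =>
      if PySem.Str.strip p = "" then acc
      else
        match PySem.Int.ofStr? (PySem.Str.strip p) with
        | some n => if 1 ≤ n ∧ n ≤ total - 1 then acc ++ [n] else acc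
        | none => acc) acc
    = acc ++ l.filterMap (pcsAccept total) := by
  induction l generalizing acc with
  | nil => simp
  | cons p t ih =>
    simp only [List.foldl_cons, List.filterMap_cons, ih, pcsAccept]
    by_cases hs : PySem.Str.strip p = ""
    · rw [if_pos hs, if_pos hs]
    · rw [if_neg hs, if_neg hs]
      cases h : PySem.Int.ofStr? (PySem.Str.strip p) with
      | none => dsimp only
      | some n => dsimp only; split_ifs with hr <;> simp

-- B's parse loop folds pcsInsort over exactly the same accepted values.
theorem pcs_cutsB_eq (total : Int) (l : List String) (acc : List Int) :
    l.foldl (fun cuts p =>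
      let part := PySem.Str.strip p
      if part = "" then cuts
      else
        match PySem.Int.ofStr? part with
        | none => cuts
        | some n => if 1 ≤ n ∧ n ≤ total - 1 then pcsInsort cuts n else cuts) acc
    = (l.filterMap (pcsAccept total)).foldl pcsInsort acc := by
  induction l generalizing acc with
  | nil => simp
  | cons p t ih =>
    simp only [List.foldl_cons, List.filterMap_cons, ih, pcsAccept]
    by_cases hs : PySem.Str.strip p = ""
    · rw [if_pos hs, if_pos hs]
    · rw [if_neg hs, if_neg hs]
      cases h : PySem.Int.ofStr? (PySem.Str.strip p) with
      | none => dsimp only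
      | some n => dsimp only; split_ifs with hr <;> simp

theorem mem_pcsInsort (cuts : List Int) (n x : Int) :
    x ∈ pcsInsort cuts n ↔ x = n ∨ x ∈ cuts := by
  induction cuts with
  | nil => simp [pcsInsort]
  | cons c rest ih =>
    unfold pcsInsort
    split_ifs with h1 h2
    · simp
    · subst h2; simp
    · simp only [List.mem_cons, ih]; tauto

theorem pairwise_pcsInsort (cuts : List Int) (n : Int)
    (h : cuts.Pairwise (· < ·)) : (pcsInsort cuts n).Pairwise (· < ·) := by
  induction cuts with
  | nil => simp [pcsInsort]
  | cons c rest ih =>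
    rw [List.pairwise_cons] at h
    unfold pcsInsort
    split_ifs with h1 h2
    · refine List.pairwise_cons.mpr ⟨?_, List.pairwise_cons.mpr h⟩
      intro a ha
      rcases List.mem_cons.mp ha with rfl | hm
      · exact h1
      · exact lt_trans h1 (h.1 a hm)
    · exact List.pairwise_cons.mpr h
    · have hcn : c < n := by omega
      refine List.pairwise_cons.mpr ⟨?_, ih h.2⟩
      intro a ha
      rcases (mem_pcsInsort rest n a).mp ha with rfl | hm
      · exact hcn
      · exact h.1 a hm

-- folding pcsInsort keeps strict increase and accumulates exactly the members
theorem pcs_foldl_insort (rs : List Int) (acc : List Int)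
    (h : acc.Pairwise (· < ·)) :
    (rs.foldl pcsInsort acc).Pairwise (· < ·) ∧
    (∀ x, x ∈ rs.foldl pcsInsort acc ↔ x ∈ acc ∨ x ∈ rs) := by
  induction rs generalizing acc with
  | nil => exact ⟨h, by simp⟩
  | cons r t ih =>
    simp only [List.foldl_cons]
    obtain ⟨hp, hm⟩ := ih (pcsInsort acc r) (pairwise_pcsInsort acc r h)
    refine ⟨hp, fun x => ?_⟩
    rw [hm x, mem_pcsInsort]
    simp; tauto

-- B's insertion-built cut list IS sorted(set(raw)).
theorem pcs_cuts_agree (raw : List Int) :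
    PySem.List.sorted (PySem.Set.ofList raw) (fun x => x) false
      = raw.foldl pcsInsort [] := by
  obtain ⟨hp, hm⟩ := pcs_foldl_insort raw [] (by simp)
  apply PySem.List.sorted_eq_of_perm_of_pairwise_lt
  · rw [List.perm_ext_iff_of_nodup (hp.imp ne_of_lt) (PySem.Set.nodup_ofList raw)]
    intro a
    rw [hm a, PySem.Set.mem_ofList]
    simp
  · exact hp

-- A's segment loop with running start and trailing tail-if equals B's segment recursion.
theorem pcs_seg_eq (total : Int) (cuts : List Int)
    (h : ∀ c ∈ cuts, c ≤ total - 1) (start : Int) (hs : start ≤ total)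
    (init : List (Int × Int)) :
    (let st := cuts.foldl (fun (s : List (Int × Int) × Int) c => (s.1 ++ [(s.2, c)], c + 1)) (init, start)
     if st.2 ≤ total then st.1 ++ [(st.2, total)] else st.1)
    = init ++ pcsSegments start cuts total := by
  induction cuts generalizing start init with
  | nil => simp [pcsSegments, hs]
  | cons c cs ih =>
    have hc : c ≤ total - 1 := h c (by simp)
    have key := ih (fun x hx => h x (by simp [hx])) (c + 1) (by omega) (init ++ [(start, c)])
    simp only [List.foldl_cons] at key ⊢
    rw [pcsSegments, key]
    simp

theorem pcs_main (spec : String) (total : Int) :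
    parse_cuts_spec spec total = parse_cuts_spec_alt spec total := by
  unfold parse_cuts_spec parse_cuts_spec_alt
  rw [pcs_raw_eq, pcs_cutsB_eq]
  simp only [List.nil_append]
  set raw := ((PySem.Str.split? spec ",").getD []).filterMap (pcsAccept total) with hraw
  rw [pcs_cuts_agree raw]
  set cuts := raw.foldl pcsInsort [] with hcuts
  have hmem : ∀ c ∈ cuts, 1 ≤ c ∧ c ≤ total - 1 := by
    intro c hc
    obtain ⟨_, hm⟩ := pcs_foldl_insort raw [] (by simp)
    rw [hcuts, hm c] at hc
    rcases hc with hc | hc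
    · simp at hc
    · rw [hraw, List.mem_filterMap] at hc
      obtain ⟨p, _, hp⟩ := hc
      unfold pcsAccept at hp
      split_ifs at hp with h1
      cases h2 : PySem.Int.ofStr? (PySem.Str.strip p) with
      | none => rw [h2] at hp; simp at hp
      | some n =>
        rw [h2] at hp; dsimp only at hp
        split_ifs at hp with hr
        cases hp; exact hr
  cases hc : cuts with
  | nil => simp [pcsSegments]
  | cons c cs =>
    rw [if_neg (List.cons_ne_nil c cs)]
    have h1 : ∀ x ∈ c :: cs, x ≤ total - 1 := by
      rw [← hc]; exact fun x hx => (hmem x hx).2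
    have htot : (1 : Int) ≤ total := by
      have := hmem c (by rw [hc]; simp)
      omega
    have key := pcs_seg_eq total (c :: cs) h1 1 htot []
    dsimp only at key
    simp only [List.nil_append] at key
    rw [key]

-- ===== VERDICT (by name: the statement is the Claim_ definition above) =====
theorem parse_cuts_spec_spec : Claim_equal_parse_cuts_spec := by
  intro spec total _
  unfold Spec_parse_cuts_spec
  exact pcs_main spec total
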